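-- pv_equiv track=rewrite | github.com/ConvoSphere/ConvoSphere | backend/app/core/validation.py | validate_path_traversal
-- ===== SOURCE A (Python) =====
-- def validate_path_traversal(path: str) -> bool:
--     """Check for path traversal attempts."""
--     dangerous_patterns = [
--         "..",
--         "~",
--         "/etc/",
--         "/proc/",
--         "/sys/",
--         "/dev/",
--         "cmd",
--         "exec",
--         "system",
--         "\\",
--         "//",
--     ]
--
--     for pattern in dangerous_patterns:
--         if pattern in path:
--             return False
--     return True
-- ===== SOURCE B (Python) =====
-- _PATTERNS = ["..", "~", "/etc/", "/proc/", "/sys/", "/dev/",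
--              "cmd", "exec", "system", "\\", "//"]
--
--
-- def validate_path_traversal(path: str) -> bool:
--     """Single left-to-right scan: at each position, test whether any
--     dangerous pattern starts there (position-major, one pass)."""
--     i = 0
--     n = len(path)
--     while True:
--         if any(path.startswith(p, i) for p in _PATTERNS):
--             return False
--         if i == n:
--             return True
--         i += 1
-- ===== Notes on version B (the rewrite author's own statement) =====
-- stated objective: alternative
-- what changed: Pattern-major loop (one full substring scan per pattern) replaced by a single position-major scan of the path that at each position checks whether any pattern starts there.
import Mathlib
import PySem

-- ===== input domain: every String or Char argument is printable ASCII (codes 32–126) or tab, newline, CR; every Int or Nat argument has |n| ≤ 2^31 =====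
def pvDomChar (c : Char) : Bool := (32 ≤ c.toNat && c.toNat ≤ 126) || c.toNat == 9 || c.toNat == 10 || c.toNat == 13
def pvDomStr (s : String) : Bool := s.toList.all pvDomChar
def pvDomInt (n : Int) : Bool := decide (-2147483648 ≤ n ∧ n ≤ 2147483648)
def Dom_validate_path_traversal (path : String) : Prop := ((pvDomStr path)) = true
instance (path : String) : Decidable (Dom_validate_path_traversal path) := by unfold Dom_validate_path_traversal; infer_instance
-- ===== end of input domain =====

-- B changes the traversal: one position-major scan of the path instead of one substring scan per pattern (alternative, same cost class).

-- ===== PORT A =====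
-- A's for-loop over the pattern list: return False on the first pattern found in path.
def loopA (pats : List String) (path : String) : Bool :=
  match pats with
  | [] => true
  | p :: rest => if PySem.Str.isIn p path then false else loopA rest path

def validate_path_traversal (path : String) : Bool :=
  loopA ["..", "~", "/etc/", "/proc/", "/sys/", "/dev/", "cmd", "exec", "system", "\\", "//"] path

-- ===== PORT B =====
def pvPatterns : List String :=
  ["..", "~", "/etc/", "/proc/", "/sys/", "/dev/", "cmd", "exec", "system", "\\", "//"]

-- B's while-loop over positions: path.startswith(p, i) is startswith on the i-th suffix.
def altScan (pats : List (List Char)) : List Char → Bool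
  | [] => if pats.any (fun p => PySem.Chars.startswith [] p) then false else true
  | c :: t => if pats.any (fun p => PySem.Chars.startswith (c :: t) p) then false
              else altScan pats t

def validate_path_traversal_alt (path : String) : Bool :=
  altScan (pvPatterns.map String.toList) path.toList

-- ===== PRECONDITION & SPEC =====
def Spec_validate_path_traversal (path : String) (out : Bool) : Prop := out = validate_path_traversal_alt path
instance (path : String) (out : Bool) : Decidable (Spec_validate_path_traversal path out) := by unfold Spec_validate_path_traversal; infer_instance

-- ===== CLAIM (what is proved, stated in full; the proofs are below) =====
def Claim_equal_validate_path_traversal : Prop := ∀ (path : String), Dom_validate_path_traversal path → Spec_validate_path_traversal path (validate_path_traversal path)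

-- ===== LEMMAS AND PROOFS =====

theorem not_any_eq_all_not {α : Type} (l : List α) (f : α → Bool) :
    (!(l.any f)) = l.all (fun x => !(f x)) := by
  induction l with
  | nil => rfl
  | cons a t ih => simp [List.any_cons, List.all_cons, Bool.not_or, ih]

theorem any_or_distrib {α : Type} (l : List α) (f g : α → Bool) :
    (l.any (fun x => f x || g x)) = (l.any f || l.any g) := by
  induction l with
  | nil => rfl
  | cons a t ih =>
    simp [List.any_cons, ih]
    cases f a <;> cases g a <;> simp

theorem isIn_cons (p : List Char) (c : Char) (t : List Char) :
    PySem.Chars.isIn p (c :: t)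
      = (PySem.Chars.startswith (c :: t) p || PySem.Chars.isIn p t) := by
  rw [Bool.eq_iff_iff]
  simp only [Bool.or_eq_true, PySem.Chars.isIn_iff_infix, PySem.Chars.startswith_iff]
  exact List.infix_cons_iff

theorem isIn_nil_eq (p : List Char) :
    PySem.Chars.isIn p [] = PySem.Chars.startswith [] p := by
  rw [Bool.eq_iff_iff]
  simp only [PySem.Chars.isIn_iff_infix, PySem.Chars.startswith_iff]
  simp

theorem altScan_eq (pats : List (List Char)) (s : List Char) :
    altScan pats s = !(pats.any (fun p => PySem.Chars.isIn p s)) := by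
  induction s with
  | nil =>
    have h : (pats.any (fun p => PySem.Chars.isIn p ([] : List Char)))
        = pats.any (fun p => PySem.Chars.startswith [] p) := by
      apply List.any_congr rfl; intro p; exact isIn_nil_eq p
    simp only [altScan, h]
    cases pats.any (fun p => PySem.Chars.startswith [] p) <;> simp
  | cons c t ih =>
    have h : (pats.any (fun p => PySem.Chars.isIn p (c :: t)))
        = (pats.any (fun p => PySem.Chars.startswith (c :: t) p)
            || pats.any (fun p => PySem.Chars.isIn p t)) := by
      rw [← any_or_distrib]
      apply List.any_congr rfl; intro p; exact isIn_cons p c t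
    simp only [altScan, h, Bool.not_or]
    cases pats.any (fun p => PySem.Chars.startswith (c :: t) p) <;> simp [ih]

theorem loopA_eq (pats : List String) (path : String) :
    loopA pats path = pats.all (fun p => !(PySem.Str.isIn p path)) := by
  induction pats with
  | nil => rfl
  | cons p rest ih =>
    simp only [loopA, List.all_cons, ih]
    cases PySem.Str.isIn p path <;> simp

-- ===== VERDICT (by name: the statement is the Claim_ definition above) =====
theorem validate_path_traversal_spec : Claim_equal_validate_path_traversal := by
  intro path _
  unfold Spec_validate_path_traversal validate_path_traversal validate_path_traversal_alt
  rw [loopA_eq, altScan_eq, List.any_map, not_any_eq_all_not]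
  show pvPatterns.all _ = pvPatterns.all _
  apply List.all_congr rfl
  intro p
  simp [PySem.Str.isIn_eq]
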